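-- pv_equiv track=rewrite | github.com/Mae-4815162342/TweetGen | main.py | get_next_word_naive_impl
-- ===== SOURCE A (Python) =====
-- def get_next_word_naive_impl(word, text, used_words, lim_per_word):
--     all_words_in_tab = [t.split(" ") for t in text]
--     all_words = []
--     words_next = {}
--     next_word = False
--     for tab in all_words_in_tab:
--         all_words.extend(tab)
--     for w in all_words:
--         if next_word:
--             if w in words_next:
--                 words_next[w]  = 1 + words_next[w]
--             else:
--                 words_next[w] = 1
--             next_word = False
--         if w == word:
--             next_word = True
--     val_temp = 0
--     res = "_"
--     for w in words_next:
--         if(words_next[w] > val_temp):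
--             if w in used_words:
--                 if used_words[w] > lim_per_word:
--                     continue
--             val_temp = words_next[w]
--             res = w
--     return res
-- ===== SOURCE B (Python) =====
-- def get_next_word_naive_impl(word, text, used_words, lim_per_word):
--     # Build a full bigram transition table in one pass over the token stream.
--     table = {}
--     prev = None
--     for line in text:
--         for tok in line.split(" "):
--             if prev is not None:
--                 row = table.setdefault(prev, {})
--                 row[tok] = row.get(tok, 0) + 1
--             prev = tok
--     best, best_count = "_", 0
--     for w, c in table.get(word, {}).items():
--         if c > best_count:
--             if w in used_words and used_words[w] > lim_per_word:
--                 continue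
--             best, best_count = w, c
--     return best
-- ===== Notes on version B (the rewrite author's own statement) =====
-- stated objective: alternative
-- what changed: Replaces A's flatten-then-scan with a carried 'next word follows' flag plus a targeted counter for one word by a single pass over the lines building a full bigram transition table (token -> counter of successors), then selecting the best successor of the given word from that table.
import Mathlib
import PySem

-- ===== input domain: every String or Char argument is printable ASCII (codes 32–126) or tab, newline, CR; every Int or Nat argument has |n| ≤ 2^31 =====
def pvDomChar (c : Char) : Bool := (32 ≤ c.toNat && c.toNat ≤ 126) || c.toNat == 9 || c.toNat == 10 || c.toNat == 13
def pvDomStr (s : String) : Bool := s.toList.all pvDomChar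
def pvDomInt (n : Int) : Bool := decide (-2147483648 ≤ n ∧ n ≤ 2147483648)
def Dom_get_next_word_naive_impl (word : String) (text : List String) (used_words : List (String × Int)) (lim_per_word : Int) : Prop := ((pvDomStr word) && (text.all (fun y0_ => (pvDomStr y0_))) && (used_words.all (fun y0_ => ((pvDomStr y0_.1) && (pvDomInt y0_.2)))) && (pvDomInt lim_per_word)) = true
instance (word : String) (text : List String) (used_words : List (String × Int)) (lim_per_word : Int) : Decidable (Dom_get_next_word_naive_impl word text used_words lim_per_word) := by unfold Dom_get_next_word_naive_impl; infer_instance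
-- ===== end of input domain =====

-- B replaces A's flag-driven scan over a pre-flattened word list by a one-pass bigram
-- transition table (dict mapping each token to a counter of its successors) built directly
-- over the lines, then a selection over the successors of `word`; objective: alternative
-- decomposition, same cost.

-- shared primitive: t.split(" ") (sep nonempty, so split? always returns some)
def pySplitSpace (t : String) : List String := (PySem.Str.split? t " ").getD []

-- ===== PORT A =====
-- A's counting-loop body: count w if the flag is set, then flag := (w == word)
def pvStepA (word : String) (s : PySem.Dict String Int × Bool) (w : String) : PySem.Dict String Int × Bool :=
  let d := if s.2 then
             (if s.1.contains w then s.1.insert w (1 + s.1.getD w 0) else s.1.insert w 1)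
           else s.1
  (d, w == word)

-- A's selection-loop body over (val_temp, res)
def pvSelA (uw : PySem.Dict String Int) (lim : Int) (vr : Int × String) (p : String × Int) : Int × String :=
  if p.2 > vr.1 then
    (if uw.contains p.1 then
       (if uw.getD p.1 0 > lim then vr else (p.2, p.1))
     else (p.2, p.1))
  else vr

def get_next_word_naive_impl (word : String) (text : List String) (used_words : List (String × Int)) (lim_per_word : Int) : String :=
  let uw := PySem.Dict.ofList used_words           -- the dict argument, as Python builds it (last key wins)
  let all_words_in_tab := text.map (fun t => pySplitSpace t)
  let all_words := all_words_in_tab.foldl (fun acc tab => acc ++ tab) ([] : List String)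
  let words_next := (all_words.foldl (pvStepA word) (PySem.Dict.empty, false)).1
  (words_next.items.foldl (pvSelA uw lim_per_word) ((0 : Int), "_")).2

-- ===== PORT B =====
-- B's table-building body: table[prev][tok] += 1 (setdefault + in-place update, written immutably)
def pvStepB (s : PySem.Dict String (PySem.Dict String Int) × Option String) (tok : String) :
    PySem.Dict String (PySem.Dict String Int) × Option String :=
  let t := match s.2 with
    | some p =>
        let row := s.1.getD p PySem.Dict.empty
        s.1.insert p (row.insert tok (row.getD tok 0 + 1))
    | none => s.1
  (t, some tok)

-- B's selection body over (best, best_count)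
def pvSelB (uw : PySem.Dict String Int) (lim : Int) (bc : String × Int) (p : String × Int) : String × Int :=
  if p.2 > bc.2 then
    (if uw.contains p.1 && decide (uw.getD p.1 0 > lim) then bc else (p.1, p.2))
  else bc

def get_next_word_naive_impl_alt (word : String) (text : List String) (used_words : List (String × Int)) (lim_per_word : Int) : String :=
  let uw := PySem.Dict.ofList used_words
  let st := text.foldl
    (fun (s : PySem.Dict String (PySem.Dict String Int) × Option String) line =>
      (pySplitSpace line).foldl pvStepB s)
    ((PySem.Dict.empty : PySem.Dict String (PySem.Dict String Int)), (none : Option String))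
  let succ := st.1.getD word PySem.Dict.empty
  (succ.items.foldl (pvSelB uw lim_per_word) ("_", (0 : Int))).1

-- ===== PRECONDITION & SPEC =====
def Spec_get_next_word_naive_impl (word : String) (text : List String) (used_words : List (String × Int)) (lim_per_word : Int) (out : String) : Prop := out = get_next_word_naive_impl_alt word text used_words lim_per_word
instance (word : String) (text : List String) (used_words : List (String × Int)) (lim_per_word : Int) (out : String) : Decidable (Spec_get_next_word_naive_impl word text used_words lim_per_word out) := by unfold Spec_get_next_word_naive_impl; infer_instance

-- ===== CLAIM (what is proved, stated in full; the proofs are below) =====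
def Claim_equal_get_next_word_naive_impl : Prop := ∀ (word : String) (text : List String) (used_words : List (String × Int)) (lim_per_word : Int), Dom_get_next_word_naive_impl word text used_words lim_per_word → Spec_get_next_word_naive_impl word text used_words lim_per_word (get_next_word_naive_impl word text used_words lim_per_word)

-- ===== LEMMAS AND PROOFS =====

-- the flag A carries is exactly "previous token == word" for B's carried previous token
def pvFlagOf (word : String) : Option String → Bool
  | none => false
  | some p => p == word

theorem pvDict_inv (word : String) (ts : List String)
    (tbl : PySem.Dict String (PySem.Dict String Int)) (prev : Option String) :
    (ts.foldl (pvStepA word) (tbl.getD word PySem.Dict.empty, pvFlagOf word prev))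
      = (let r := ts.foldl pvStepB (tbl, prev)
         (r.1.getD word PySem.Dict.empty, pvFlagOf word r.2)) := by
  induction ts generalizing tbl prev with
  | nil => rfl
  | cons tok ts ih =>
    simp only [List.foldl_cons]
    have hstep : pvStepA word (tbl.getD word PySem.Dict.empty, pvFlagOf word prev) tok
        = ((pvStepB (tbl, prev) tok).1.getD word PySem.Dict.empty,
           pvFlagOf word (pvStepB (tbl, prev) tok).2) := by
      cases prev with
      | none => rfl
      | some p =>
        simp only [pvStepA, pvStepB, pvFlagOf]
        by_cases hp : p = word
        · subst hp
          simp only [beq_self_eq_true, if_true]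
          have hrow : (tbl.insert p ((tbl.getD p PySem.Dict.empty).insert tok
              ((tbl.getD p PySem.Dict.empty).getD tok 0 + 1))).getD p PySem.Dict.empty
              = (tbl.getD p PySem.Dict.empty).insert tok ((tbl.getD p PySem.Dict.empty).getD tok 0 + 1) := by
            simp [PySem.Dict.getD_insert_self]
          rw [hrow]
          congr 1
          by_cases hc : (tbl.getD p PySem.Dict.empty).contains tok
          · simp [hc, add_comm]
          · have h0 : (tbl.getD p PySem.Dict.empty).getD tok 0 = 0 := by
              simp [PySem.Dict.getD_of_not_contains, hc]
            simp [hc, h0]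
        · have hbe : (p == word) = false := by simpa using hp
          simp only [hbe]
          congr 1
          have := PySem.Dict.getD_insert_of_ne (d := tbl)
            (k := p) (k' := word)
            (v := ((tbl.getD p PySem.Dict.empty).insert tok ((tbl.getD p PySem.Dict.empty).getD tok 0 + 1)))
            (d0 := PySem.Dict.empty) (hne := Ne.symm hp)
          simp_all
    rw [hstep]
    exact ih _ _

-- the two selection folds keep the same data in swapped pair order
theorem pvSel_swap (uw : PySem.Dict String Int) (lim : Int) (items : List (String × Int))
    (v : Int) (r : String) :
    items.foldl (pvSelA uw lim) (v, r) = ((items.foldl (pvSelB uw lim) (r, v)).2, (items.foldl (pvSelB uw lim) (r, v)).1) := by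
  induction items generalizing v r with
  | nil => rfl
  | cons p items ih =>
    simp only [List.foldl_cons]
    have : pvSelA uw lim (v, r) p = ((pvSelB uw lim (r, v) p).2, (pvSelB uw lim (r, v) p).1) := by
      simp only [pvSelA, pvSelB]
      by_cases h1 : p.2 > v
      · by_cases h2 : uw.contains p.1
        · by_cases h3 : uw.getD p.1 0 > lim
          · simp [h1, h2, h3]
          · simp [h1, h2, h3]
        · simp [h1, h2]
      · simp [h1]
    rw [this]
    exact ih _ _

-- ===== VERDICT (by name: the statement is the Claim_ definition above) =====
theorem get_next_word_naive_impl_spec : Claim_equal_get_next_word_naive_impl := by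
  intro word text used_words lim_per_word _
  unfold Spec_get_next_word_naive_impl get_next_word_naive_impl get_next_word_naive_impl_alt
  simp only []
  have hflat : (text.map (fun t => pySplitSpace t)).foldl (fun acc tab => acc ++ tab) ([] : List String)
      = text.flatMap pySplitSpace := by
    rw [List.foldl_map]
    induction text using List.reverseRecOn with
    | nil => simp
    | append_singleton xs x ih => simp [List.flatMap]
  have hfuse : text.foldl
      (fun (s : PySem.Dict String (PySem.Dict String Int) × Option String) line =>
        (pySplitSpace line).foldl pvStepB s)
      (PySem.Dict.empty, none)
      = (text.flatMap pySplitSpace).foldl pvStepB (PySem.Dict.empty, none) :=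
    (List.foldl_flatMap ..).symm
  have hinv := pvDict_inv word (text.flatMap pySplitSpace) PySem.Dict.empty none
  have hwords : ((text.flatMap pySplitSpace).foldl (pvStepA word)
        (PySem.Dict.empty, false)).1
      = ((text.flatMap pySplitSpace).foldl pvStepB (PySem.Dict.empty, none)).1.getD word PySem.Dict.empty := by
    have := congrArg Prod.fst hinv
    simpa [pvFlagOf] using this
  rw [hflat]
  rw [← hfuse] at hwords
  rw [hwords]
  exact congrArg Prod.snd (pvSel_swap (PySem.Dict.ofList used_words) lim_per_word _ 0 "_")
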